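-- pv_equiv track=rewrite | github.com/klissh/AyatFinder | app.py | calculate_absolute_ayah_number
-- ===== SOURCE A (Python) =====
-- def calculate_absolute_ayah_number(surah, verse):
--     """Calculate absolute ayah number (1-6236) from surah and verse"""
--     # Complete mapping of verse counts for all 114 surahs
--     surah_verse_counts = {
--         1: 7, 2: 286, 3: 200, 4: 176, 5: 120, 6: 165, 7: 206, 8: 75, 9: 129, 10: 109,
--         11: 123, 12: 111, 13: 43, 14: 52, 15: 99, 16: 128, 17: 111, 18: 110, 19: 98, 20: 135,
--         21: 112, 22: 78, 23: 118, 24: 64, 25: 77, 26: 227, 27: 93, 28: 88, 29: 69, 30: 60,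
--         31: 34, 32: 30, 33: 73, 34: 54, 35: 45, 36: 83, 37: 182, 38: 88, 39: 75, 40: 85,
--         41: 54, 42: 53, 43: 89, 44: 59, 45: 37, 46: 35, 47: 38, 48: 29, 49: 18, 50: 45,
--         51: 60, 52: 49, 53: 62, 54: 55, 55: 78, 56: 96, 57: 29, 58: 22, 59: 24, 60: 13,
--         61: 14, 62: 11, 63: 11, 64: 18, 65: 12, 66: 12, 67: 30, 68: 52, 69: 52, 70: 44,
--         71: 28, 72: 28, 73: 20, 74: 56, 75: 40, 76: 31, 77: 50, 78: 40, 79: 46, 80: 42,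
--         81: 29, 82: 19, 83: 36, 84: 25, 85: 22, 86: 17, 87: 19, 88: 26, 89: 30, 90: 20,
--         91: 15, 92: 21, 93: 11, 94: 8, 95: 8, 96: 19, 97: 5, 98: 8, 99: 8, 100: 11,
--         101: 11, 102: 8, 103: 3, 104: 9, 105: 5, 106: 4, 107: 7, 108: 3, 109: 6, 110: 3,
--         111: 5, 112: 4, 113: 5, 114: 6
--     }
--
--     absolute_number = 0
--     for s in range(1, surah):
--         if s in surah_verse_counts:
--             absolute_number += surah_verse_counts[s]
--
--     absolute_number += verse
--     return absolute_number
-- ===== SOURCE B (Python) =====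
-- # Verse counts of surahs 1..114, as a list (index k = surah k+1).
-- _SURAH_VERSE_COUNTS = [
--     7, 286, 200, 176, 120, 165, 206, 75, 129, 109,
--     123, 111, 43, 52, 99, 128, 111, 110, 98, 135,
--     112, 78, 118, 64, 77, 227, 93, 88, 69, 60,
--     34, 30, 73, 54, 45, 83, 182, 88, 75, 85,
--     54, 53, 89, 59, 37, 35, 38, 29, 18, 45,
--     60, 49, 62, 55, 78, 96, 29, 22, 24, 13,
--     14, 11, 11, 18, 12, 12, 30, 52, 52, 44,
--     28, 28, 20, 56, 40, 31, 50, 40, 46, 42,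
--     29, 19, 36, 25, 22, 17, 19, 26, 30, 20,
--     15, 21, 11, 8, 8, 19, 5, 8, 8, 11,
--     11, 8, 3, 9, 5, 4, 7, 3, 6, 3,
--     5, 4, 5, 6,
-- ]
--
-- # Prefix-sum table built once: _PREFIX[k] = total verses of surahs 1..k, _PREFIX[0] = 0.
-- _PREFIX = [0]
-- for _c in _SURAH_VERSE_COUNTS:
--     _PREFIX.append(_PREFIX[-1] + _c)
--
--
-- def calculate_absolute_ayah_number(surah, verse):
--     """Calculate absolute ayah number (1-6236) from surah and verse"""
--     idx = min(max(surah - 1, 0), 114)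
--     return _PREFIX[idx] + verse
-- ===== Notes on version B (the rewrite author's own statement) =====
-- stated objective: faster
-- what changed: Replaced the per-call loop over range(1, surah) with a module-level cumulative prefix-sum table built once; each call is a single clamped table lookup plus verse.
import Mathlib
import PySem

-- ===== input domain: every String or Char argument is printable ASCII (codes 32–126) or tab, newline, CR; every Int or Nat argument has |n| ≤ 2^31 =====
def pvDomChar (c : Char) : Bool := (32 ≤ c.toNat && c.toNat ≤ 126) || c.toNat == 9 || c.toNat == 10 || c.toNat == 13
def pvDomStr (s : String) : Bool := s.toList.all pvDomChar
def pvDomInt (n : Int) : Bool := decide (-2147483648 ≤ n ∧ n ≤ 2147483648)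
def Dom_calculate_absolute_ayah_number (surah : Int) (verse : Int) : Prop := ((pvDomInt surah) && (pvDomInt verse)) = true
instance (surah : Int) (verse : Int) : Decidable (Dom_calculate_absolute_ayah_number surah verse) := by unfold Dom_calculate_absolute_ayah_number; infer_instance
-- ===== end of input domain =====

-- B replaces A's per-call accumulation loop with a prefix-sum table built once and a single clamped lookup (simpler per-call code).

-- ===== PORT A =====
def pvSurahVerseCounts : PySem.Dict Int Int := PySem.Dict.ofList [
  (1, 7), (2, 286), (3, 200), (4, 176), (5, 120), (6, 165), (7, 206), (8, 75), (9, 129), (10, 109),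
  (11, 123), (12, 111), (13, 43), (14, 52), (15, 99), (16, 128), (17, 111), (18, 110), (19, 98), (20, 135),
  (21, 112), (22, 78), (23, 118), (24, 64), (25, 77), (26, 227), (27, 93), (28, 88), (29, 69), (30, 60),
  (31, 34), (32, 30), (33, 73), (34, 54), (35, 45), (36, 83), (37, 182), (38, 88), (39, 75), (40, 85),
  (41, 54), (42, 53), (43, 89), (44, 59), (45, 37), (46, 35), (47, 38), (48, 29), (49, 18), (50, 45),
  (51, 60), (52, 49), (53, 62), (54, 55), (55, 78), (56, 96), (57, 29), (58, 22), (59, 24), (60, 13),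
  (61, 14), (62, 11), (63, 11), (64, 18), (65, 12), (66, 12), (67, 30), (68, 52), (69, 52), (70, 44),
  (71, 28), (72, 28), (73, 20), (74, 56), (75, 40), (76, 31), (77, 50), (78, 40), (79, 46), (80, 42),
  (81, 29), (82, 19), (83, 36), (84, 25), (85, 22), (86, 17), (87, 19), (88, 26), (89, 30), (90, 20),
  (91, 15), (92, 21), (93, 11), (94, 8), (95, 8), (96, 19), (97, 5), (98, 8), (99, 8), (100, 11),
  (101, 11), (102, 8), (103, 3), (104, 9), (105, 5), (106, 4), (107, 7), (108, 3), (109, 6), (110, 3),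
  (111, 5), (112, 4), (113, 5), (114, 6)]

def calculate_absolute_ayah_number (surah : Int) (verse : Int) : Int :=
  let absolute_number : Int :=
    (PySem.List.pyRange 1 surah 1).foldl
      (fun acc s =>
        if pvSurahVerseCounts.contains s then acc + pvSurahVerseCounts.getD s 0 else acc) 0
  absolute_number + verse

-- ===== PORT B =====
-- verse counts of surahs 1..114 (Source B's _SURAH_VERSE_COUNTS)
def pvCounts : List Int := [
  7, 286, 200, 176, 120, 165, 206, 75, 129, 109,
  123, 111, 43, 52, 99, 128, 111, 110, 98, 135,
  112, 78, 118, 64, 77, 227, 93, 88, 69, 60,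
  34, 30, 73, 54, 45, 83, 182, 88, 75, 85,
  54, 53, 89, 59, 37, 35, 38, 29, 18, 45,
  60, 49, 62, 55, 78, 96, 29, 22, 24, 13,
  14, 11, 11, 18, 12, 12, 30, 52, 52, 44,
  28, 28, 20, 56, 40, 31, 50, 40, 46, 42,
  29, 19, 36, 25, 22, 17, 19, 26, 30, 20,
  15, 21, 11, 8, 8, 19, 5, 8, 8, 11,
  11, 8, 3, 9, 5, 4, 7, 3, 6, 3,
  5, 4, 5, 6]

-- prefix-sum table built once (Source B's _PREFIX loop)
def pvPrefix : List Int := pvCounts.foldl (fun p c => p ++ [p.getLast! + c]) [0]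

def calculate_absolute_ayah_number_alt (surah : Int) (verse : Int) : Int :=
  let idx : Int := min (max (surah - 1) 0) 114
  PySem.List.pyGetD pvPrefix idx 0 + verse

-- ===== PRECONDITION & SPEC =====
def Spec_calculate_absolute_ayah_number (surah : Int) (verse : Int) (out : Int) : Prop := out = calculate_absolute_ayah_number_alt surah verse
instance (surah : Int) (verse : Int) (out : Int) : Decidable (Spec_calculate_absolute_ayah_number surah verse out) := by unfold Spec_calculate_absolute_ayah_number; infer_instance

-- ===== CLAIM (what is proved, stated in full; the proofs are below) =====
def Claim_equal_calculate_absolute_ayah_number : Prop := ∀ (surah : Int) (verse : Int), Dom_calculate_absolute_ayah_number surah verse → Spec_calculate_absolute_ayah_number surah verse (calculate_absolute_ayah_number surah verse)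

-- ===== LEMMAS AND PROOFS =====

-- A's loop body, named for the lemmas
def pvStep (acc s : Int) : Int :=
  if pvSurahVerseCounts.contains s then acc + pvSurahVerseCounts.getD s 0 else acc

-- the dict has no key ≥ 115
lemma pv_contains_false {s : Int} (h : 115 ≤ s) :
    pvSurahVerseCounts.contains s = false := by
  simp [pvSurahVerseCounts, PySem.Dict.ofList, PySem.Dict.update,
    PySem.Dict.contains_insert, PySem.Dict.contains_empty]
  omega

lemma pv_foldl_high (x : Int) : ∀ (l : List Int), (∀ s ∈ l, 115 ≤ s) →
    l.foldl pvStep x = x := by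
  intro l
  induction l generalizing x with
  | nil => intro _; rfl
  | cons a t ih =>
    intro h
    have ha : pvSurahVerseCounts.contains a = false := pv_contains_false (h a (by simp))
    rw [List.foldl_cons]
    have hx : pvStep x a = x := by simp [pvStep, ha]
    rw [hx]
    exact ih x (fun s hs => h s (by simp [hs]))

-- the two sides agree for every surah in 2..115 (finite boolean check)
set_option maxRecDepth 100000 in
lemma pv_table_bool : ((PySem.List.pyRange 2 116 1).all (fun n =>
    (PySem.List.pyRange 1 n 1).foldl pvStep 0
      == PySem.List.pyGetD pvPrefix (min (max (n - 1) 0) 114) 0)) = true := by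
  decide

lemma pv_table : ∀ n ∈ PySem.List.pyRange 2 116 1,
    (PySem.List.pyRange 1 n 1).foldl pvStep 0
      = PySem.List.pyGetD pvPrefix (min (max (n - 1) 0) 114) 0 := by
  intro n hn
  have := List.all_eq_true.mp pv_table_bool n hn
  exact eq_of_beq this

set_option maxRecDepth 100000 in
lemma pv_sum_eq (n : Int) :
    (PySem.List.pyRange 1 n 1).foldl pvStep 0
      = PySem.List.pyGetD pvPrefix (min (max (n - 1) 0) 114) 0 := by
  by_cases h1 : n ≤ 1
  · rw [PySem.List.pyRange_one_eq_nil h1]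
    have : min (max (n - 1) 0) 114 = 0 := by omega
    rw [this]
    decide
  · by_cases h2 : n ≤ 115
    · exact pv_table n (by rw [PySem.List.mem_pyRange_one]; omega)
    · have hsplit := PySem.List.pyRange_one_append 1 115 n (by omega) (by omega)
      rw [hsplit, List.foldl_append]
      rw [pv_foldl_high _ (PySem.List.pyRange 115 n 1)
        (fun s hs => (PySem.List.mem_pyRange_one.mp hs).1)]
      have h115 := pv_table 115 (by rw [PySem.List.mem_pyRange_one]; omega)
      have hmin : min (max (n - 1) 0) 114 = (114 : Int) := by omega
      have hmin' : min (max ((115:Int) - 1) 0) 114 = (114 : Int) := by omega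
      rw [hmin]
      rw [hmin'] at h115
      exact h115

-- ===== VERDICT (by name: the statement is the Claim_ definition above) =====
theorem calculate_absolute_ayah_number_spec : Claim_equal_calculate_absolute_ayah_number := by
  intro surah verse _
  show calculate_absolute_ayah_number surah verse = calculate_absolute_ayah_number_alt surah verse
  have h : calculate_absolute_ayah_number surah verse
      = (PySem.List.pyRange 1 surah 1).foldl pvStep 0 + verse := rfl
  rw [h, pv_sum_eq surah]
  rfl
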